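-- pv_equiv track=rewrite | github.com/locomotive-lib/locomotive | locomotive/cli.py | _gate_status
-- ===== SOURCE A (Python) =====
-- from typing import Any, Dict, List, Optional
--
-- def _gate_status(gate_eval: Dict[str, Any]) -> str:
--     """Derive a single status from gate evaluation results only."""
--     results = gate_eval.get("results") or []
--     statuses = [r.get("status") for r in results if r.get("status") not in (None, "SKIP")]
--     if not statuses:
--         return "PASS"
--     if "DEGRADATION" in statuses:
--         return "DEGRADATION"
--     if "WARNING" in statuses:
--         return "WARNING"
--     return "PASS"
-- ===== SOURCE B (Python) =====
-- def _gate_status(gate_eval):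
--     """Derive a single status from gate evaluation results only."""
--     _RANK = {"DEGRADATION": 2, "WARNING": 1}
--     best = 0
--     for r in (gate_eval.get("results") or []):
--         s = r.get("status")
--         if s is None or s == "SKIP":
--             continue
--         best = max(best, _RANK.get(s, 0))
--     return {2: "DEGRADATION", 1: "WARNING"}.get(best, "PASS")
-- ===== Notes on version B (the rewrite author's own statement) =====
-- stated objective: alternative
-- what changed: Replaces the intermediate statuses list plus two ordered membership rescans with a single fold keeping the maximum severity rank (DEGRADATION=2, WARNING=1, other=0), translated back to a status string at the end.
import Mathlib
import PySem

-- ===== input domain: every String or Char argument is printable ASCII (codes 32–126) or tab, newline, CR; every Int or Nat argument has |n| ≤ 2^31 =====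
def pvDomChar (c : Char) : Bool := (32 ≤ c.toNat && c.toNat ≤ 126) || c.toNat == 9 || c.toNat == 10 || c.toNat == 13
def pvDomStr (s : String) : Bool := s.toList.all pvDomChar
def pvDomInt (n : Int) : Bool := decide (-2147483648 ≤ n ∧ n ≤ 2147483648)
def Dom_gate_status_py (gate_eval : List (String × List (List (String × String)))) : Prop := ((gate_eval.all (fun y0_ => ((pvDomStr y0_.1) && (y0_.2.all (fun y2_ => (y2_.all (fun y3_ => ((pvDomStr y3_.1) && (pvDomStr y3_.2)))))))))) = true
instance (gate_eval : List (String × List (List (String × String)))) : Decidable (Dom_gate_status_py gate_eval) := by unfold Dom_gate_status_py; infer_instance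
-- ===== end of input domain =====

-- B folds the results once keeping the maximum severity rank instead of building a
-- statuses list and rescanning it twice; same return value everywhere.

-- shared helper: Python dict.get on an insertion-ordered association list (first match)
def pvGet {α : Type} (d : List (String × α)) (k : String) : Option α :=
  match d with
  | [] => none
  | (k', v) :: t => if k' = k then some v else pvGet t k

-- ===== PORT A =====
-- statuses = [r.get("status") for r in results if r.get("status") not in (None, "SKIP")]
def pvStatuses (results : List (List (String × String))) : List (Option String) :=
  (results.filter (fun r =>
      match pvGet r "status" with
      | none => false
      | some s => s ≠ "SKIP")).map (fun r => pvGet r "status")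

def gate_status_py (gate_eval : List (String × List (List (String × String)))) : String :=
  let results := (pvGet gate_eval "results").getD []   -- .get("results") or []
  let statuses := pvStatuses results
  if statuses = [] then "PASS"
  else if (some "DEGRADATION") ∈ statuses then "DEGRADATION"
  else if (some "WARNING") ∈ statuses then "WARNING"
  else "PASS"

-- ===== PORT B =====
-- _RANK.get(s, 0)
def pvRank (s : String) : Nat :=
  if s = "DEGRADATION" then 2 else if s = "WARNING" then 1 else 0

def gate_status_py_alt (gate_eval : List (String × List (List (String × String)))) : String :=
  let results := (pvGet gate_eval "results").getD []
  let best : Nat := results.foldl (fun acc r =>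
      match pvGet r "status" with
      | none => acc
      | some s => if s = "SKIP" then acc else max acc (pvRank s)) 0
  if best = 2 then "DEGRADATION" else if best = 1 then "WARNING" else "PASS"

-- ===== PRECONDITION & SPEC =====
def Spec_gate_status_py (gate_eval : List (String × List (List (String × String)))) (out : String) : Prop := out = gate_status_py_alt gate_eval
instance (gate_eval : List (String × List (List (String × String)))) (out : String) : Decidable (Spec_gate_status_py gate_eval out) := by unfold Spec_gate_status_py; infer_instance

-- ===== CLAIM (what is proved, stated in full; the proofs are below) =====
def Claim_equal_gate_status_py : Prop := ∀ (gate_eval : List (String × List (List (String × String)))), Dom_gate_status_py gate_eval → Spec_gate_status_py gate_eval (gate_status_py gate_eval)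

-- ===== LEMMAS AND PROOFS =====

-- severity contributed by one result, 0 when it is skipped
def pvContrib (r : List (String × String)) : Nat :=
  match pvGet r "status" with
  | none => 0
  | some s => if s = "SKIP" then 0 else pvRank s

def pvScore (results : List (List (String × String))) : Nat :=
  match results with
  | [] => 0
  | r :: t => max (pvContrib r) (pvScore t)

theorem foldl_eq_score (l : List (List (String × String))) :
    ∀ acc : Nat, l.foldl (fun acc r =>
      match pvGet r "status" with
      | none => acc
      | some s => if s = "SKIP" then acc else max acc (pvRank s)) acc = max acc (pvScore l) := by
  induction l with
  | nil => intro acc; simp [pvScore]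
  | cons r t ih =>
    intro acc
    simp only [List.foldl_cons, pvScore, ih, pvContrib]
    cases h : pvGet r "status" with
    | none => simp
    | some s =>
      by_cases hs : s = "SKIP" <;> simp [hs]

theorem pvStatuses_cons (r : List (String × String)) (t : List (List (String × String))) :
    pvStatuses (r :: t) =
      (match pvGet r "status" with
       | none => pvStatuses t
       | some s => if s = "SKIP" then pvStatuses t else some s :: pvStatuses t) := by
  cases h : pvGet r "status" with
  | none => simp [pvStatuses, h]
  | some s =>
    by_cases hs : s = "SKIP" <;> simp [pvStatuses, h, hs]

theorem score_eq (l : List (List (String × String))) :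
    pvScore l = (if (some "DEGRADATION") ∈ pvStatuses l then 2
                 else if (some "WARNING") ∈ pvStatuses l then 1 else 0) := by
  induction l with
  | nil => simp [pvScore, pvStatuses]
  | cons r t ih =>
    cases h : pvGet r "status" with
    | none => simp [pvScore, pvContrib, pvStatuses_cons, h, ih]
    | some s =>
      by_cases hs : s = "SKIP"
      · simp [pvScore, pvContrib, pvStatuses_cons, h, hs, ih]
      · simp only [pvScore, pvContrib, pvStatuses_cons, h, if_neg hs, ih, List.mem_cons]
        by_cases hd : (some "DEGRADATION") ∈ pvStatuses t <;>
        by_cases hw : (some "WARNING") ∈ pvStatuses t <;>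
        by_cases hsd : s = "DEGRADATION" <;>
        by_cases hsw : s = "WARNING" <;>
        simp_all [pvRank, eq_comm]

-- ===== VERDICT (by name: the statement is the Claim_ definition above) =====
theorem gate_status_py_spec : Claim_equal_gate_status_py := by
  intro gate_eval _
  unfold Spec_gate_status_py gate_status_py gate_status_py_alt
  generalize (pvGet gate_eval "results").getD [] = rs
  simp only [foldl_eq_score, Nat.zero_max, score_eq]
  by_cases hd : (some "DEGRADATION") ∈ pvStatuses rs
  · have : pvStatuses rs ≠ [] := by intro h; simp [h] at hd
    simp [hd, this]
  · by_cases hw : (some "WARNING") ∈ pvStatuses rs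
    · have : pvStatuses rs ≠ [] := by intro h; simp [h] at hw
      simp [hd, hw, this]
    · by_cases he : pvStatuses rs = [] <;> simp [hd, hw, he]
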